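-- pv_equiv track=rewrite | github.com/wiktorwozny/algorithms-and-datastructures | EXAM/zadanie1a/egz1a.py | f
-- ===== SOURCE A (Python) =====
-- def f(S, i, j, d, DP):
--
--     if i >= j:
--         return 0
--
--     if d >= len(S):
--         return 0
--
--     if DP[i][j][d] is not None:
--         return DP[i][j][d]
--
--     maxik = -1
--     for k in range(i, j + 1):
--         zachod = f(S, k + 1, j, d + 1, DP) + S[k] - d
--         wschod = f(S, i, k - 1, d + 1, DP) + S[k] - d
--         maxik = max(maxik, zachod, wschod)
--
--     DP[i][j][d] = maxik
--     return maxik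
-- ===== SOURCE B (Python) =====
-- # Bottom-up DP: fills an explicit table layer by layer (depth descending) instead of
-- # memoized recursion; reads only the return value and does NOT write into DP
-- # (A mutates DP in place; equivalence is about the return value).
-- def f(S, i, j, d, DP):
--     n = len(S)
--     if i >= j or d >= n:
--         return 0
--     T = {}
--     def val(a, b, dd):
--         if a >= b or dd >= n:
--             return 0
--         return T[(a, b, dd)]
--     for dd in range(n - 1, d - 1, -1):
--         for a in range(i, j):
--             for b in range(a + 1, j + 1):
--                 m = -1
--                 for k in range(a, b + 1):
--                     gain = S[k] - dd
--                     m = max(m, val(k + 1, b, dd + 1) + gain, val(a, k - 1, dd + 1) + gain)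
--                 T[(a, b, dd)] = m
--     return T[(i, j, d)]
-- ===== Notes on version B (the rewrite author's own statement) =====
-- stated objective: alternative
-- what changed: Replaced A's memoized top-down recursion that fills the caller's DP cache in place with an iterative bottom-up fill of a fresh table, layer by descending depth, reading only S and the return value (B never touches DP).
-- outside the precondition, e.g. on f([1, 2], 0, 1, 0, [[[None], [5]], [[None], [None]]]): A returns 5, B returns 2
import Mathlib
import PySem

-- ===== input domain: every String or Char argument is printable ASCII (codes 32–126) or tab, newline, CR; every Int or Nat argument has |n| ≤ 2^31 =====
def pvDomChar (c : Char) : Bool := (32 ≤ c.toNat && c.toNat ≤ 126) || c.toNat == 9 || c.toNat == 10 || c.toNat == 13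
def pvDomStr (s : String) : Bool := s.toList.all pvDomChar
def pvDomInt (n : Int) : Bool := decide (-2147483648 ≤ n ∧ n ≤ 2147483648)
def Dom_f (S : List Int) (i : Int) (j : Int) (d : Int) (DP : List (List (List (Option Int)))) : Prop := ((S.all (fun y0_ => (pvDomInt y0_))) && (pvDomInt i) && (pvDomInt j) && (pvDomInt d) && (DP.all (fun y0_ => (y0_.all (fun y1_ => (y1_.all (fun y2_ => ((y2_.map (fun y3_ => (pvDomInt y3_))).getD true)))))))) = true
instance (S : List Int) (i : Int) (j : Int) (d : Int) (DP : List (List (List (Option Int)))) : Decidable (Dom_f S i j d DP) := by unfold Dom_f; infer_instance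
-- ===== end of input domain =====

-- B replaces A's memoized recursion by an explicit bottom-up table fill (alternative
-- decomposition, same cost class); A mutates DP in place while B leaves it untouched —
-- the equivalence proved here is about the return value only.

-- ===== PORT A =====
-- A is memoized recursion mutating DP; the port threads the cache DP as explicit state.

-- DP[i][j][d] as an rvalue (none = IndexError in Python; Pre_f keeps reads in range)
def readDP (DP : List (List (List (Option Int)))) (i j d : Int) : Option (Option Int) :=
  (PySem.List.pyGet? DP i).bind fun r =>
    (PySem.List.pyGet? r j).bind fun c => PySem.List.pyGet? c d

-- the statement DP[i][j][d] = v; exact for 0 ≤ i, j, d within bounds, which holds whenever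
-- A executes this statement on a Pre_f input (Python would wrap a negative index / raise out of range)
def writeDP (DP : List (List (List (Option Int)))) (i j d : Int) (v : Int) :
    List (List (List (Option Int))) :=
  DP.modify i.toNat (fun r => r.modify j.toNat (fun c => c.set d.toNat (some v)))

-- A's 'for k in range(i, j+1)' loop: threads (maxik, DP); F is the recursive call at depth d+1
def fALoop (F : Int → Int → List (List (List (Option Int))) → Int × List (List (List (Option Int))))
    (S : List Int) (i j d : Int) :
    List Int → Int → List (List (List (Option Int))) → Int × List (List (List (Option Int)))
  | [], maxik, DP => (maxik, DP)
  | k :: ks, maxik, DP =>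
    let z := F (k + 1) j DP                      -- zachod = f(S, k+1, j, d+1, DP) + S[k] - d
    let w := F i (k - 1) z.2                     -- wschod = f(S, i, k-1, d+1, DP) + S[k] - d
    let sk := (PySem.List.pyGet? S k).getD 0     -- S[k] (in range whenever reached under Pre_f)
    fALoop F S i j d ks (max maxik (max (z.1 + sk - d) (w.1 + sk - d))) w.2

-- fuel only makes the recursion structural: the top call passes fuel = len(S) - d and every
-- recursive call increases d by 1, so fuel never runs out before the 'd >= len(S)' guard fires
def fAAux (S : List Int) : Nat → Int → Int → Int → List (List (List (Option Int))) →
    Int × List (List (List (Option Int)))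
  | 0, i, j, d, DP =>
    if i ≥ j then (0, DP)
    else if d ≥ (S.length : Int) then (0, DP)
    else
      match readDP DP i j d with
      | some (some v) => (v, DP)                 -- if DP[i][j][d] is not None: return DP[i][j][d]
      | _ => (0, DP)                             -- fuel exhausted: unreachable (see comment above)
  | fuel' + 1, i, j, d, DP =>
    if i ≥ j then (0, DP)
    else if d ≥ (S.length : Int) then (0, DP)
    else
      match readDP DP i j d with
      | some (some v) => (v, DP)                 -- if DP[i][j][d] is not None: return DP[i][j][d]
      | _ =>
        let p := fALoop (fun a b dp => fAAux S fuel' a b (d + 1) dp) S i j d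
                   (PySem.List.pyRange i (j + 1) 1) (-1) DP
        (p.1, writeDP p.2 i j d p.1)             -- DP[i][j][d] = maxik; return maxik

def f (S : List Int) (i : Int) (j : Int) (d : Int) (DP : List (List (List (Option Int)))) : Int :=
  (fAAux S ((S.length : Int) - d).toNat i j d DP).1

-- ===== PORT B =====
-- bottom-up fill: T[(a,b,dd)] for depth layers dd = n-1 … d, intervals [a,b] ⊆ [i,j]

-- helper val(a, b, dd): 0 outside the recursion, else T[(a,b,dd)]
-- (the plain T[(a,b,dd)] lookup: the key was always filled by the previous layer)
def bVal (n : Int) (T : PySem.Dict (Int × Int × Int) Int) (a b dd : Int) : Int :=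
  if a ≥ b ∨ dd ≥ n then 0 else (T.get? (a, b, dd)).getD 0

-- the 'for k in range(a, b+1)' max-accumulation for one cell
def bCell (S : List Int) (n : Int) (T : PySem.Dict (Int × Int × Int) Int) (a b dd : Int) : Int :=
  (PySem.List.pyRange a (b + 1) 1).foldl
    (fun m k =>
      let gain := (PySem.List.pyGet? S k).getD 0 - dd    -- S[k] - dd
      max m (max (bVal n T (k + 1) b (dd + 1) + gain) (bVal n T a (k - 1) (dd + 1) + gain)))
    (-1)

-- the 'for b in range(a+1, j+1)' loop
def bRow (S : List Int) (n : Int) (j dd a : Int) (T : PySem.Dict (Int × Int × Int) Int) :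
    PySem.Dict (Int × Int × Int) Int :=
  (PySem.List.pyRange (a + 1) (j + 1) 1).foldl
    (fun T b => T.insert (a, b, dd) (bCell S n T a b dd)) T

-- the 'for a in range(i, j)' loop
def bLayer (S : List Int) (n : Int) (i j dd : Int) (T : PySem.Dict (Int × Int × Int) Int) :
    PySem.Dict (Int × Int × Int) Int :=
  (PySem.List.pyRange i j 1).foldl (fun T a => bRow S n j dd a T) T

def f_alt (S : List Int) (i : Int) (j : Int) (d : Int) (DP : List (List (List (Option Int)))) : Int :=
  let n : Int := (S.length : Int)
  if i ≥ j ∨ d ≥ n then 0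
  else
    -- for dd in range(n-1, d-1, -1): fill layer dd
    let T := (PySem.List.pyRange (n - 1) (d - 1) (-1)).foldl
      (fun T dd => bLayer S n i j dd T) PySem.Dict.empty
    (T.get? (i, j, d)).getD 0                    -- return T[(i, j, d)]

-- ===== PRECONDITION & SPEC =====
-- Pre_f excludes, in the non-trivial case only, (i) negative depths d — A's cache read
-- DP[i][j][d] wraps around via Python negative indexing (IndexError for d < -len(S)) — and
-- (ii) caches DP that are not an all-None len(S)×len(S)×len(S) table, on which A raises
-- IndexError or returns whatever stale value the pre-seeded cache happens to hold.
def Pre_f (S : List Int) (i : Int) (j : Int) (d : Int) (DP : List (List (List (Option Int)))) : Prop :=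
  i ≥ j ∨ d ≥ (S.length : Int) ∨
    (0 ≤ i ∧ i < j ∧ j < (S.length : Int) ∧ 0 ≤ d ∧
     DP.length = S.length ∧
     ∀ r ∈ DP, r.length = S.length ∧ ∀ c ∈ r, c.length = S.length ∧ ∀ x ∈ c, x = none)
instance (S : List Int) (i : Int) (j : Int) (d : Int) (DP : List (List (List (Option Int)))) :
    Decidable (Pre_f S i j d DP) := by unfold Pre_f; infer_instance

def pvWitness_f : List Int × Int × Int × Int × List (List (List (Option Int))) :=
  ([1, 2], 0, 1, 0, [[[none, none], [none, none]], [[none, none], [none, none]]])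

def Spec_f (S : List Int) (i : Int) (j : Int) (d : Int) (DP : List (List (List (Option Int)))) (out : Int) : Prop := out = f_alt S i j d DP
instance (S : List Int) (i : Int) (j : Int) (d : Int) (DP : List (List (List (Option Int)))) (out : Int) : Decidable (Spec_f S i j d DP out) := by unfold Spec_f; infer_instance

-- ===== CLAIM (what is proved, stated in full; the proofs are below) =====
def Claim_equal_f : Prop := ∀ (S : List Int) (i : Int) (j : Int) (d : Int) (DP : List (List (List (Option Int)))), Dom_f S i j d DP → Pre_f S i j d DP → Spec_f S i j d DP (f S i j d DP)

-- ===== LEMMAS AND PROOFS =====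

-- the pure value of the recursion, fuel-indexed; used at fuel = (len(S) - d).toNat
def gAux (S : List Int) : Nat → Int → Int → Int → Int
  | 0, _, _, _ => 0
  | fuel + 1, i, j, d =>
    if i ≥ j ∨ d ≥ (S.length : Int) then 0
    else
      (PySem.List.pyRange i (j + 1) 1).foldl
        (fun m k =>
          max m (max (gAux S fuel (k + 1) j (d + 1) + ((PySem.List.pyGet? S k).getD 0 - d))
                     (gAux S fuel i (k - 1) (d + 1) + ((PySem.List.pyGet? S k).getD 0 - d))))
        (-1)

def gP (S : List Int) (i j d : Int) : Int := gAux S ((S.length : Int) - d).toNat i j d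

lemma gP_guard {S : List Int} {i j d : Int} (h : i ≥ j ∨ d ≥ (S.length : Int)) :
    gP S i j d = 0 := by
  unfold gP
  cases hf : ((S.length : Int) - d).toNat with
  | zero => rfl
  | succ m => simp only [gAux]; rw [if_pos h]

lemma gP_step {S : List Int} {i j d : Int} (hij : i < j) (hd : d < (S.length : Int)) :
    gP S i j d =
      (PySem.List.pyRange i (j + 1) 1).foldl
        (fun m k =>
          max m (max (gP S (k + 1) j (d + 1) + ((PySem.List.pyGet? S k).getD 0 - d))
                     (gP S i (k - 1) (d + 1) + ((PySem.List.pyGet? S k).getD 0 - d))))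
        (-1) := by
  have h1 : ((S.length : Int) - d).toNat = ((S.length : Int) - (d + 1)).toNat + 1 := by omega
  unfold gP
  rw [h1]
  simp only [gAux]
  rw [if_neg (by omega : ¬(i ≥ j ∨ d ≥ (S.length : Int)))]

-- shape of the cache, phrased through getElem? for easy preservation proofs
def Sh (n : Nat) (DP : List (List (List (Option Int)))) : Prop :=
  DP.length = n ∧ ∀ (x : Nat) r, DP[x]? = some r →
    r.length = n ∧ ∀ (y : Nat) c, r[y]? = some c → c.length = n

-- every filled cache cell holds the pure value
def InvDP (S : List Int) (DP : List (List (List (Option Int)))) : Prop :=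
  ∀ a b dd v, 0 ≤ a → 0 ≤ b → 0 ≤ dd → readDP DP a b dd = some (some v) → v = gP S a b dd

lemma readDP_nonneg (DP : List (List (List (Option Int)))) {a b dd : Int}
    (ha : 0 ≤ a) (hb : 0 ≤ b) (hd : 0 ≤ dd) :
    readDP DP a b dd =
      (DP[a.toNat]?.bind fun r => r[b.toNat]?.bind fun cl => cl[dd.toNat]?) := by
  unfold readDP
  rw [PySem.List.pyGet?_of_nonneg _ ha]
  cases hr : DP[a.toNat]? with
  | none => rfl
  | some r =>
    simp only [Option.bind_some]
    rw [PySem.List.pyGet?_of_nonneg _ hb]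
    cases hc : r[b.toNat]? with
    | none => rfl
    | some c =>
      simp only [Option.bind_some]
      exact PySem.List.pyGet?_of_nonneg _ hd

lemma writeDP_Sh {n : Nat} {DP : List (List (List (Option Int)))} (hsh : Sh n DP)
    (i j d : Int) (v : Int) : Sh n (writeDP DP i j d v) := by
  obtain ⟨hlen, hrow⟩ := hsh
  refine ⟨by simp only [writeDP, List.length_modify]; exact hlen, ?_⟩
  intro x r hx
  unfold writeDP at hx
  rw [List.getElem?_modify] at hx
  cases hr : DP[x]? with
  | none => rw [hr] at hx; simp at hx
  | some r0 =>
    rw [hr] at hx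
    simp only [Option.map_eq_map, Option.map_some, Option.some.injEq] at hx
    obtain ⟨hrl, hcol⟩ := hrow x r0 hr
    by_cases hix : i.toNat = x
    · rw [if_pos hix] at hx
      subst hx
      refine ⟨by simp only [List.length_modify]; exact hrl, ?_⟩
      intro y cc hy
      rw [List.getElem?_modify] at hy
      cases hc : r0[y]? with
      | none => rw [hc] at hy; simp at hy
      | some c0 =>
        rw [hc] at hy
        simp only [Option.map_eq_map, Option.map_some, Option.some.injEq] at hy
        have hcl := hcol y c0 hc
        by_cases hjy : j.toNat = y
        · rw [if_pos hjy] at hy; subst hy; simp only [List.length_set]; exact hcl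
        · rw [if_neg hjy] at hy; subst hy; exact hcl
    · rw [if_neg hix] at hx
      subst hx
      exact ⟨hrl, hcol⟩

lemma readDP_writeDP {n : Nat} {DP : List (List (List (Option Int)))} (hsh : Sh n DP)
    {i j d : Int} (hi0 : 0 ≤ i) (hj0 : 0 ≤ j) (hd0 : 0 ≤ d)
    (hi : i < (n : Int)) (hj : j < (n : Int)) (hd : d < (n : Int)) (v : Int)
    {a b dd : Int} (ha : 0 ≤ a) (hb : 0 ≤ b) (hdd : 0 ≤ dd) :
    readDP (writeDP DP i j d v) a b dd =
      if a = i ∧ b = j ∧ dd = d then some (some v) else readDP DP a b dd := by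
  obtain ⟨hlen, hrow⟩ := hsh
  have hia : i.toNat < DP.length := by omega
  have hr0 : DP[i.toNat]? = some DP[i.toNat] := List.getElem?_eq_getElem hia
  obtain ⟨hrl, hcol⟩ := hrow i.toNat _ hr0
  have hjb : j.toNat < DP[i.toNat].length := by omega
  have hc0 : DP[i.toNat][j.toNat]? = some DP[i.toNat][j.toNat] := List.getElem?_eq_getElem hjb
  have hcl := hcol j.toNat _ hc0
  rw [readDP_nonneg _ ha hb hdd, readDP_nonneg _ ha hb hdd]
  unfold writeDP
  rw [List.getElem?_modify]
  by_cases hai : a = i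
  · subst hai
    rw [hr0]
    simp only [Option.map_eq_map, Option.map_some, Option.bind_some, eq_self_iff_true,
      if_true, true_and]
    rw [List.getElem?_modify]
    by_cases hbj : b = j
    · subst hbj
      rw [hc0]
      simp only [Option.map_eq_map, Option.map_some, Option.bind_some, eq_self_iff_true,
        if_true, true_and]
      rw [List.getElem?_set]
      by_cases hdde : dd = d
      · subst hdde
        rw [if_pos rfl, if_pos (by omega : dd.toNat < DP[a.toNat][b.toNat].length),
          if_pos rfl]
      · rw [if_neg (by omega : ¬ d.toNat = dd.toNat), if_neg hdde]
    · have hne : ¬ j.toNat = b.toNat := by omega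
      rw [if_neg (fun h => hbj h.1)]
      cases hcc : DP[a.toNat][b.toNat]? with
      | none => rfl
      | some cc =>
        simp only [Option.map_eq_map, Option.map_some, Option.bind_some, if_neg hne]
  · have hne : ¬ i.toNat = a.toNat := by omega
    rw [if_neg (fun h => hai h.1)]
    cases hr : DP[a.toNat]? with
    | none => rfl
    | some r =>
      simp only [Option.map_eq_map, Option.map_some, Option.bind_some, if_neg hne]

-- A's k-loop computes the fold of the pure step function and preserves the cache invariants
lemma fALoop_main {S : List Int} {i j d : Int}
    {F : Int → Int → List (List (List (Option Int))) → Int × List (List (List (Option Int)))}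
    (hF : ∀ a b DP, 0 ≤ a → b < (S.length : Int) → Sh S.length DP → InvDP S DP →
      (F a b DP).1 = gP S a b (d + 1) ∧ Sh S.length (F a b DP).2 ∧ InvDP S (F a b DP).2)
    (hi : 0 ≤ i) (hj : j < (S.length : Int)) :
    ∀ (ks : List Int), (∀ k ∈ ks, i ≤ k ∧ k ≤ j) → ∀ (m : Int) DP, Sh S.length DP → InvDP S DP →
      (fALoop F S i j d ks m DP).1 =
        ks.foldl (fun m k =>
          max m (max (gP S (k + 1) j (d + 1) + ((PySem.List.pyGet? S k).getD 0 - d))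
                     (gP S i (k - 1) (d + 1) + ((PySem.List.pyGet? S k).getD 0 - d)))) m ∧
      Sh S.length (fALoop F S i j d ks m DP).2 ∧ InvDP S (fALoop F S i j d ks m DP).2 := by
  intro ks
  induction ks with
  | nil => intro _ m DP hsh hinv; exact ⟨rfl, hsh, hinv⟩
  | cons k ks ih =>
    intro hks m DP hsh hinv
    obtain ⟨hik, hkj⟩ := hks k List.mem_cons_self
    obtain ⟨hz1, hz2, hz3⟩ := hF (k + 1) j DP (by omega) hj hsh hinv
    obtain ⟨hw1, hw2, hw3⟩ := hF i (k - 1) (F (k + 1) j DP).2 hi (by omega) hz2 hz3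
    simp only [fALoop, List.foldl_cons]
    rw [hz1, hw1,
      (by ring : gP S (k + 1) j (d + 1) + (PySem.List.pyGet? S k).getD 0 - d
        = gP S (k + 1) j (d + 1) + ((PySem.List.pyGet? S k).getD 0 - d)),
      (by ring : gP S i (k - 1) (d + 1) + (PySem.List.pyGet? S k).getD 0 - d
        = gP S i (k - 1) (d + 1) + ((PySem.List.pyGet? S k).getD 0 - d))]
    exact ih (fun k' hk' => hks k' (List.mem_cons_of_mem _ hk')) _ _ hw2 hw3

-- main lemma for A: with a sound cache, the memoized recursion returns the pure value
-- and leaves the cache sound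
lemma fA_main (S : List Int) :
    ∀ (fuel : Nat) (d : Int), (S.length : Int) - d ≤ (fuel : Int) → 0 ≤ d →
    ∀ (i j : Int) DP, 0 ≤ i → j < (S.length : Int) → Sh S.length DP → InvDP S DP →
      (fAAux S fuel i j d DP).1 = gP S i j d ∧
      Sh S.length (fAAux S fuel i j d DP).2 ∧ InvDP S (fAAux S fuel i j d DP).2 := by
  intro fuel
  induction fuel with
  | zero =>
    intro d hfuel hd0 i j DP hi hj hsh hinv
    simp only [fAAux]
    by_cases hij : i ≥ j
    · rw [if_pos hij]; exact ⟨(gP_guard (Or.inl hij)).symm, hsh, hinv⟩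
    · rw [if_neg hij, if_pos (by omega : d ≥ (S.length : Int))]
      exact ⟨(gP_guard (Or.inr (by omega))).symm, hsh, hinv⟩
  | succ fuel' ih =>
    intro d hfuel hd0 i j DP hi hj hsh hinv
    simp only [fAAux]
    by_cases hij : i ≥ j
    · rw [if_pos hij]; exact ⟨(gP_guard (Or.inl hij)).symm, hsh, hinv⟩
    rw [if_neg hij]
    by_cases hdn : d ≥ (S.length : Int)
    · rw [if_pos hdn]; exact ⟨(gP_guard (Or.inr hdn)).symm, hsh, hinv⟩
    rw [if_neg hdn]
    have hj0 : 0 ≤ j := by omega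
    rcases hread : readDP DP i j d with _ | (_ | v)
    · -- cache read out of range: never happens on a sound, well-shaped cache with these bounds
      exfalso
      rw [readDP_nonneg _ hi hj0 hd0] at hread
      have hlen' : DP.length = S.length := hsh.1
      have hia : i.toNat < DP.length := by omega
      have hr0 : DP[i.toNat]? = some DP[i.toNat] := List.getElem?_eq_getElem hia
      obtain ⟨hrl, hcol⟩ := hsh.2 i.toNat _ hr0
      have hjb : j.toNat < DP[i.toNat].length := by omega
      have hc0 : DP[i.toNat][j.toNat]? = some DP[i.toNat][j.toNat] := List.getElem?_eq_getElem hjb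
      have hcl := hcol j.toNat _ hc0
      have hdc : d.toNat < DP[i.toNat][j.toNat].length := by omega
      rw [hr0] at hread
      simp only [Option.bind_some] at hread
      rw [hc0] at hread
      simp only [Option.bind_some] at hread
      rw [List.getElem?_eq_getElem hdc] at hread
      simp at hread
    · -- cache miss: run the loop, then write the result back
      dsimp only
      have hF : ∀ a b DP', 0 ≤ a → b < (S.length : Int) → Sh S.length DP' → InvDP S DP' →
          (fAAux S fuel' a b (d + 1) DP').1 = gP S a b (d + 1) ∧
          Sh S.length (fAAux S fuel' a b (d + 1) DP').2 ∧
          InvDP S (fAAux S fuel' a b (d + 1) DP').2 := by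
        intro a b DP' ha hb hsh' hinv'
        exact ih (d + 1) (by push_cast at hfuel ⊢; omega) (by omega) a b DP' ha hb hsh' hinv'
      have hks : ∀ k ∈ PySem.List.pyRange i (j + 1) 1, i ≤ k ∧ k ≤ j := by
        intro k hk
        rw [PySem.List.mem_pyRange_one] at hk
        omega
      obtain ⟨hl1, hl2, hl3⟩ := fALoop_main hF hi hj (PySem.List.pyRange i (j + 1) 1) hks (-1) DP hsh hinv
      have hval : (fALoop (fun a b dp => fAAux S fuel' a b (d + 1) dp) S i j d
          (PySem.List.pyRange i (j + 1) 1) (-1) DP).1 = gP S i j d := by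
        rw [hl1, gP_step (by omega) (by omega)]
      refine ⟨hval, writeDP_Sh hl2 _ _ _ _, ?_⟩
      intro a b dd v ha hb hdd hr
      rw [hval] at hr
      rw [readDP_writeDP hl2 hi hj0 hd0 (by omega) (by omega) (by omega) _ ha hb hdd] at hr
      by_cases hcase : a = i ∧ b = j ∧ dd = d
      · rw [if_pos hcase] at hr
        obtain ⟨h1, h2, h3⟩ := hcase
        subst h1; subst h2; subst h3
        cases hr
        rfl
      · rw [if_neg hcase] at hr
        exact hl3 a b dd v ha hb hdd hr
    · -- cache hit
      dsimp only
      exact ⟨hinv i j d v hi hj0 hd0 hread, hsh, hinv⟩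

-- ---------- B side ----------

-- "layers dd0 … n-1 of the table are correctly filled for all intervals inside [i, j]"
def TOK (S : List Int) (i j dd0 : Int) (T : PySem.Dict (Int × Int × Int) Int) : Prop :=
  ∀ a b dd', i ≤ a → a < b → b ≤ j → dd0 ≤ dd' → dd' < (S.length : Int) →
    T.get? (a, b, dd') = some (gP S a b dd')

lemma bCell_eq {S : List Int} {i j : Int} {T : PySem.Dict (Int × Int × Int) Int} {dd : Int}
    (hT : TOK S i j (dd + 1) T) {a b : Int} (hia : i ≤ a) (hab : a < b) (hbj : b ≤ j)
    (hdd : dd < (S.length : Int)) :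
    bCell S (S.length : Int) T a b dd = gP S a b dd := by
  rw [gP_step hab hdd]
  unfold bCell
  apply List.foldl_ext
  intro m k hk
  rw [PySem.List.mem_pyRange_one] at hk
  have e1 : bVal (S.length : Int) T (k + 1) b (dd + 1) = gP S (k + 1) b (dd + 1) := by
    unfold bVal
    by_cases hg : k + 1 ≥ b ∨ dd + 1 ≥ (S.length : Int)
    · rw [if_pos hg, gP_guard hg]
    · rw [if_neg hg]
      push_neg at hg
      rw [hT (k + 1) b (dd + 1) (by omega) (by omega) hbj (by omega) (by omega)]
      rfl
  have e2 : bVal (S.length : Int) T a (k - 1) (dd + 1) = gP S a (k - 1) (dd + 1) := by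
    unfold bVal
    by_cases hg : a ≥ k - 1 ∨ dd + 1 ≥ (S.length : Int)
    · rw [if_pos hg, gP_guard hg]
    · rw [if_neg hg]
      push_neg at hg
      rw [hT a (k - 1) (dd + 1) hia (by omega) (by omega) (by omega) (by omega)]
      rfl
  simp only [e1, e2]

lemma bRow_main {S : List Int} {i j dd : Int} (hdd : dd < (S.length : Int))
    {a : Int} (hia : i ≤ a) :
    ∀ (bs : List Int) (T : PySem.Dict (Int × Int × Int) Int),
      (∀ b ∈ bs, a < b ∧ b ≤ j) → TOK S i j (dd + 1) T →
      TOK S i j (dd + 1) (bs.foldl (fun T b => T.insert (a, b, dd) (bCell S (S.length : Int) T a b dd)) T) ∧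
      (∀ key : Int × Int × Int, key.1 ≠ a ∨ key.2.2 ≠ dd →
        (bs.foldl (fun T b => T.insert (a, b, dd) (bCell S (S.length : Int) T a b dd)) T).get? key = T.get? key) ∧
      (∀ b', a < b' → b' ≤ j → (b' ∈ bs ∨ T.get? (a, b', dd) = some (gP S a b' dd)) →
        (bs.foldl (fun T b => T.insert (a, b, dd) (bCell S (S.length : Int) T a b dd)) T).get? (a, b', dd) = some (gP S a b' dd)) := by
  intro bs
  induction bs with
  | nil =>
    intro T _ hT
    refine ⟨hT, fun _ _ => rfl, ?_⟩
    intro b' _ _ h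
    rcases h with h | h
    · exact absurd h (List.not_mem_nil)
    · exact h
  | cons b0 bs ih =>
    intro T hbs hT
    obtain ⟨hab0, hb0j⟩ := hbs b0 (List.mem_cons_self)
    have hcell : bCell S (S.length : Int) T a b0 dd = gP S a b0 dd :=
      bCell_eq hT hia hab0 hb0j hdd
    set T1 := T.insert (a, b0, dd) (bCell S (S.length : Int) T a b0 dd) with hT1
    have hT1ok : TOK S i j (dd + 1) T1 := by
      intro a' b' dd' h1 h2 h3 h4 h5
      rw [hT1, PySem.Dict.get?_insert]
      rw [if_neg (by rintro ⟨rfl, rfl, rfl⟩; omega)]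
      exact hT a' b' dd' h1 h2 h3 h4 h5
    obtain ⟨ihok, ihpres, ihcov⟩ := ih T1 (fun b hb => hbs b (List.mem_cons_of_mem _ hb)) hT1ok
    simp only [List.foldl_cons]
    refine ⟨ihok, ?_, ?_⟩
    · intro key hkey
      rw [ihpres key hkey, hT1, PySem.Dict.get?_insert]
      rw [if_neg (by rintro rfl; rcases hkey with h | h <;> exact h rfl)]
    · intro b' hab' hb'j hsrc
      rcases hsrc with hmem | hval
      · rcases List.mem_cons.mp hmem with rfl | hmem'
        · exact ihcov b' hab' hb'j (Or.inr (by rw [hT1, PySem.Dict.get?_insert, if_pos rfl, hcell]))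
        · exact ihcov b' hab' hb'j (Or.inl hmem')
      · refine ihcov b' hab' hb'j (Or.inr ?_)
        rw [hT1, PySem.Dict.get?_insert]
        by_cases hbe : b' = b0
        · subst hbe; rw [if_pos rfl, hcell]
        · rw [if_neg (by rintro ⟨rfl, rfl, rfl⟩; exact hbe rfl)]; exact hval

lemma bLayer_main {S : List Int} {i j dd : Int} (hdd : dd < (S.length : Int)) :
    ∀ (as : List Int) (T : PySem.Dict (Int × Int × Int) Int),
      (∀ a ∈ as, i ≤ a ∧ a < j) → TOK S i j (dd + 1) T →
      TOK S i j (dd + 1) (as.foldl (fun T a => bRow S (S.length : Int) j dd a T) T) ∧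
      (∀ key : Int × Int × Int, key.2.2 ≠ dd →
        (as.foldl (fun T a => bRow S (S.length : Int) j dd a T) T).get? key = T.get? key) ∧
      (∀ a' b', i ≤ a' → a' < b' → b' ≤ j →
        (a' ∈ as ∨ T.get? (a', b', dd) = some (gP S a' b' dd)) →
        (as.foldl (fun T a => bRow S (S.length : Int) j dd a T) T).get? (a', b', dd) = some (gP S a' b' dd)) := by
  intro as
  induction as with
  | nil =>
    intro T _ hT
    refine ⟨hT, fun _ _ => rfl, ?_⟩
    intro a' b' _ _ _ h
    rcases h with h | h
    · exact absurd h (List.not_mem_nil)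
    · exact h
  | cons a0 as ih =>
    intro T has hT
    obtain ⟨hia0, ha0j⟩ := has a0 (List.mem_cons_self)
    have hrow := bRow_main hdd hia0 (PySem.List.pyRange (a0 + 1) (j + 1) 1) T
      (fun b hb => by rw [PySem.List.mem_pyRange_one] at hb; omega) hT
    obtain ⟨hrok, hrpres, hrcov⟩ := hrow
    have hbrow : bRow S (S.length : Int) j dd a0 T =
        (PySem.List.pyRange (a0 + 1) (j + 1) 1).foldl
          (fun T b => T.insert (a0, b, dd) (bCell S (S.length : Int) T a0 b dd)) T := rfl
    obtain ⟨ihok, ihpres, ihcov⟩ := ih (bRow S (S.length : Int) j dd a0 T)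
      (fun a ha => has a (List.mem_cons_of_mem _ ha)) (by rw [hbrow]; exact hrok)
    simp only [List.foldl_cons]
    refine ⟨ihok, ?_, ?_⟩
    · intro key hkey
      rw [ihpres key hkey, hbrow, hrpres key (Or.inr hkey)]
    · intro a' b' hia' hab' hb'j hsrc
      rcases hsrc with hmem | hval
      · rcases List.mem_cons.mp hmem with rfl | hmem'
        · exact ihcov a' b' hia' hab' hb'j (Or.inr (by rw [hbrow]; exact hrcov b' hab' hb'j (Or.inl (by rw [PySem.List.mem_pyRange_one]; omega))))
        · exact ihcov a' b' hia' hab' hb'j (Or.inl hmem')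
      · refine ihcov a' b' hia' hab' hb'j (Or.inr ?_)
        by_cases hae : a' = a0
        · subst hae
          rw [hbrow]
          exact hrcov b' hab' hb'j (Or.inr hval)
        · rw [hbrow, hrpres (a', b', dd) (Or.inl hae)]
          exact hval

lemma layers_main {S : List Int} {i j : Int} (hij : i < j) (hj : j ≤ (S.length : Int)) :
    ∀ (k : Nat) (dd : Int), ((S.length : Int) - dd).toNat = k →
      TOK S i j dd ((PySem.List.pyRange ((S.length : Int) - 1) (dd - 1) (-1)).foldl
        (fun T dd' => bLayer S (S.length : Int) i j dd' T) PySem.Dict.empty) := by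
  intro k
  induction k with
  | zero =>
    intro dd hk
    have hge : (S.length : Int) ≤ dd := by omega
    rw [PySem.List.pyRange_neg_one_eq_nil (by omega)]
    intro a b dd' _ _ _ h4 h5
    omega
  | succ k ih =>
    intro dd hk
    have hlt : dd < (S.length : Int) := by omega
    have hsplit : PySem.List.pyRange ((S.length : Int) - 1) (dd - 1) (-1) =
        PySem.List.pyRange ((S.length : Int) - 1) dd (-1) ++ [dd] := by
      rw [PySem.List.pyRange_neg_one_eq_reverse, PySem.List.pyRange_neg_one_eq_reverse]
      have : dd - 1 + 1 = dd := by omega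
      rw [this]
      rw [PySem.List.pyRange_one_cons (by omega : dd < (S.length : Int) - 1 + 1)]
      simp
    rw [hsplit, List.foldl_append]
    set T0 := (PySem.List.pyRange ((S.length : Int) - 1) dd (-1)).foldl
      (fun T dd' => bLayer S (S.length : Int) i j dd' T) PySem.Dict.empty with hT0
    have hT0ok : TOK S i j (dd + 1) T0 := by
      have := ih (dd + 1) (by omega)
      have he : dd + 1 - 1 = dd := by omega
      rw [he] at this
      exact this
    simp only [List.foldl_cons, List.foldl_nil]
    have hlayer := bLayer_main hlt (PySem.List.pyRange i j 1) T0
      (fun a ha => by rw [PySem.List.mem_pyRange_one] at ha; omega) hT0ok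
    obtain ⟨hok, hpres, hcov⟩ := hlayer
    have hbl : bLayer S (S.length : Int) i j dd T0 =
        (PySem.List.pyRange i j 1).foldl (fun T a => bRow S (S.length : Int) j dd a T) T0 := rfl
    intro a b dd' h1 h2 h3 h4 h5
    rcases eq_or_lt_of_le h4 with rfl | hgt
    · rw [hbl]
      exact hcov a b h1 h2 h3 (Or.inl (by rw [PySem.List.mem_pyRange_one]; omega))
    · rw [hbl, hpres (a, b, dd') (by simp; omega)]
      exact hT0ok a b dd' h1 h2 h3 (by omega) h5

-- ===== VERDICT (by name: the statement is the Claim_ definition above) =====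
theorem f_spec : Claim_equal_f := by
  intro S i j d DP _ hpre
  unfold Spec_f
  by_cases hij : i ≥ j
  · simp only [f, f_alt]
    rw [if_pos (Or.inl hij : i ≥ j ∨ d ≥ (S.length : Int))]
    cases hf : ((S.length : Int) - d).toNat with
    | zero => simp only [fAAux]; rw [if_pos hij]
    | succ m => simp only [fAAux]; rw [if_pos hij]
  by_cases hdn : d ≥ (S.length : Int)
  · simp only [f, f_alt]
    rw [if_pos (Or.inr hdn : i ≥ j ∨ d ≥ (S.length : Int))]
    cases hf : ((S.length : Int) - d).toNat with
    | zero => simp only [fAAux]; rw [if_neg hij, if_pos hdn]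
    | succ m => simp only [fAAux]; rw [if_neg hij, if_pos hdn]
  -- non-trivial case: Pre_f's third disjunct holds
  rcases hpre with h | h | ⟨hi0, hij', hjn, hd0, hlen, hshape⟩
  · exact absurd h hij
  · exact absurd h hdn
  have hsh : Sh S.length DP := by
    refine ⟨hlen, ?_⟩
    intro x r hx
    have hr : r ∈ DP := List.mem_of_getElem? hx
    obtain ⟨hrl, hcol⟩ := hshape r hr
    refine ⟨hrl, ?_⟩
    intro y c hy
    have hc : c ∈ r := List.mem_of_getElem? hy
    exact (hcol c hc).1
  have hinv : InvDP S DP := by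
    intro a b dd v ha hb hdd hread
    exfalso
    rw [readDP_nonneg _ ha hb hdd] at hread
    cases hr : DP[a.toNat]? with
    | none => rw [hr] at hread; simp at hread
    | some r =>
      rw [hr] at hread
      simp only [Option.bind_some] at hread
      cases hc : r[b.toNat]? with
      | none => rw [hc] at hread; simp at hread
      | some c =>
        rw [hc] at hread
        simp only [Option.bind_some] at hread
        have hmem : some v ∈ c := List.mem_of_getElem? hread
        have := (hshape r (List.mem_of_getElem? hr)).2 c (List.mem_of_getElem? hc)
        simpa using this.2 (some v) hmem
  have hfuel : (S.length : Int) - d ≤ (((S.length : Int) - d).toNat : Int) := Int.self_le_toNat _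
  obtain ⟨hval, _, _⟩ := fA_main S ((S.length : Int) - d).toNat d hfuel hd0 i j DP hi0 hjn hsh hinv
  simp only [f]
  rw [hval]
  -- now compute f_alt
  simp only [f_alt]
  rw [if_neg (by push_neg; exact ⟨by omega, by omega⟩)]
  have hT := layers_main (by omega : i < j) (by omega) ((S.length : Int) - d).toNat d rfl
  rw [hT i j d (le_refl i) (by omega) (le_refl j) (le_refl d) (by omega)]
  rfl
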